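-- pv_equiv track=rewrite | github.com/shohei-kojima/phylo-dbscan | main.py | nwk_split
-- ===== SOURCE A (Python) =====
-- def nwk_split(line):
--     ls=[]
--     tmp=[]
--     inside_name=0
--     for c in line:
--         if c == '"':
--             inside_name = (inside_name + 1) % 2
--             tmp.append(c)
--         else:
--             if inside_name == 0:
--                 if c == '(' or c == ')':
--                     if len(tmp) >= 1:
--                         ls.append(''.join(tmp))
--                         tmp=[]
--                     ls.append(c)
--                 elif c == ',':
--                     ls.append(''.join(tmp))
--                     tmp=[]
--                 elif c == ';':
--                     if len(tmp) >= 1: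
--                         ls.append(''.join(tmp))
--                 else:
--                     tmp.append(c)
--             else:
--                 tmp.append(c)
--     if ls[-1] == ')':
--         # unrooted tree
--         ls.append('_:0')
--     # list up names
--     names=[]
--     for i in range(1, len(ls)):
--         prev = ls[i - 1]
--         current = ls[i]
--         if not current == '(' and not current == ')':
--             if prev == ')':
--                 continue
--             name,_ = current.split(':')
--             names.append(name)
--     return ls,names
-- ===== SOURCE B (Python) =====
-- def _emit(ls, names, tok):
--     # append tok to ls; if it sits in a name position (not first, previous
--     # token not ')'), record its name part at the same time
--     if tok != '(' and tok != ')' and ls and ls[-1] != ')':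
--         name, _ = tok.split(':')
--         names.append(name)
--     ls.append(tok)
--
-- def nwk_split(line):
--     # single fused pass: tokenize and collect names at the same time
--     ls = []
--     names = []
--     tmp = []
--     inside = 0
--     for c in line:
--         if c == '"':
--             inside = (inside + 1) % 2
--             tmp.append(c)
--         elif inside:
--             tmp.append(c)
--         elif c == '(' or c == ')':
--             if tmp:
--                 _emit(ls, names, ''.join(tmp))
--                 tmp = []
--             ls.append(c)
--         elif c == ',':
--             _emit(ls, names, ''.join(tmp))
--             tmp = []
--         elif c == ';':
--             if tmp:
--                 _emit(ls, names, ''.join(tmp))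
--         else:
--             tmp.append(c)
--     if ls[-1] == ')':
--         # unrooted tree
--         ls.append('_:0')
--     return ls, names
-- ===== Notes on version B (the rewrite author's own statement) =====
-- stated objective: alternative
-- what changed: A tokenizes the Newick line into ls and then runs a second index-based pass over ls to extract names; B fuses the two passes into one scan that, at the moment a joined token is appended to ls, decides inline (previous element exists and is not ')') whether its name part goes into names, so the second pass over ls disappears.
import Mathlib
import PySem

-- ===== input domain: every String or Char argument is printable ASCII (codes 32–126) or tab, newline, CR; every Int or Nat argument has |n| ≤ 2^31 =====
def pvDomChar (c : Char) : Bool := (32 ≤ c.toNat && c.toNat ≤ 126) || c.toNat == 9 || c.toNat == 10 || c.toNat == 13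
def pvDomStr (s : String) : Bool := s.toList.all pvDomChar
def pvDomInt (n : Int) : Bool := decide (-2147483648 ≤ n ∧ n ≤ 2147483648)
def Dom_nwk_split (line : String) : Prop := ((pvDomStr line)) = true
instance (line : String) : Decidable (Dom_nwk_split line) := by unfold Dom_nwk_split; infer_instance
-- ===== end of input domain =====

-- B fuses A's two passes (tokenize, then a second scan of the tokens for names) into one
-- scan that decides inline, at each token append, whether its name part is recorded.
-- Both programs raise on the same inputs (empty token list → IndexError; a name-position
-- token without exactly one ':' → ValueError); Pre_ excludes exactly those.

-- ===== PORT A =====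
-- first loop of A: state (ls, tmp, inside_name)
def nwkStepA (s : List String × List Char × Int) (c : Char) : List String × List Char × Int :=
  let ls := s.1; let tmp := s.2.1; let inside := s.2.2
  if c = '"' then (ls, tmp ++ [c], PySem.Int.mod (inside + 1) 2)
  else if inside = 0 then
    if c = '(' ∨ c = ')' then
      if tmp.length ≥ 1 then (ls ++ [String.ofList tmp, String.ofList [c]], [], inside)
      else (ls ++ [String.ofList [c]], tmp, inside)
    else if c = ',' then (ls ++ [String.ofList tmp], [], inside)
    else if c = ';' then
      if tmp.length ≥ 1 then (ls ++ [String.ofList tmp], tmp, inside) else (ls, tmp, inside)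
    else (ls, tmp ++ [c], inside)
  else (ls, tmp ++ [c], inside)

-- body of A's second loop ('for i in range(1, len(ls))'); the pyGetD defaults are
-- unreachable (i is in range); the non-two-element split match is Python's ValueError,
-- excluded by Pre_
def nwkNameStep (lsf : List String) (names : List String) (i : Int) : List String :=
  let prev := PySem.List.pyGetD lsf (i - 1) ""
  let current := PySem.List.pyGetD lsf i ""
  if ¬ current = "(" ∧ ¬ current = ")" then
    if prev = ")" then names
    else
      match PySem.Str.split? current ":" with
      | some [name, _] => names ++ [name]
      | _ => names
  else names

def nwk_split (line : String) : List String × List String :=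
  let st := line.toList.foldl nwkStepA ([], [], 0)
  let ls := st.1
  let ls :=
    match PySem.List.pyGet? ls (-1) with
    | some t => if t = ")" then ls ++ ["_:0"] else ls
    | none => ls      -- Python: IndexError on empty ls; excluded by Pre_
  let names := (PySem.List.pyRange 1 (ls.length : Int) 1).foldl (nwkNameStep ls) []
  (ls, names)

-- ===== PORT B =====
-- B's helper _emit: append tok to ls and, inline, its name part to names when it sits in
-- a name position; the non-two-element split match is Python's ValueError, excluded by Pre_
def nwkEmit (p : List String × List String) (tok : String) : List String × List String :=
  let names :=
    if tok ≠ "(" ∧ tok ≠ ")" ∧ p.1 ≠ [] ∧ PySem.List.pyGetD p.1 (-1) "" ≠ ")" then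
      match PySem.Str.split? tok ":" with
      | some [name, _] => p.2 ++ [name]
      | _ => p.2
    else p.2
  (p.1 ++ [tok], names)

-- B's single fused loop: state ((ls, names), tmp, inside)
def nwkStepB (s : (List String × List String) × List Char × Int) (c : Char) :
    (List String × List String) × List Char × Int :=
  let p := s.1; let tmp := s.2.1; let inside := s.2.2
  if c = '"' then (p, tmp ++ [c], PySem.Int.mod (inside + 1) 2)
  else if inside ≠ 0 then (p, tmp ++ [c], inside)
  else if c = '(' ∨ c = ')' then
    if tmp ≠ [] then
      let p := nwkEmit p (String.ofList tmp)
      ((p.1 ++ [String.ofList [c]], p.2), [], inside)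
    else ((p.1 ++ [String.ofList [c]], p.2), tmp, inside)
  else if c = ',' then (nwkEmit p (String.ofList tmp), [], inside)
  else if c = ';' then (if tmp ≠ [] then nwkEmit p (String.ofList tmp) else p, tmp, inside)
  else (p, tmp ++ [c], inside)

def nwk_split_alt (line : String) : List String × List String :=
  let st := line.toList.foldl nwkStepB (([], []), [], 0)
  let ls := st.1.1
  let names := st.1.2
  let ls :=
    match PySem.List.pyGet? ls (-1) with
    | some t => if t = ")" then ls ++ ["_:0"] else ls
    | none => ls      -- Python: IndexError on empty ls; excluded by Pre_
  (ls, names)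

-- ===== PRECONDITION & SPEC =====
-- Pre_ excludes exactly the inputs on which Python A raises (it returns everywhere else):
-- lines yielding no token (IndexError at ls[-1]) and lines with a name-position token whose
-- ':'-count is not 1 (ValueError at 'name,_ = current.split(':')').  It needs the Newick
-- token decomposition of the line, stated below as a plain forward recursion over the
-- characters — a property of the input, not a re-run of either port.
def nwkPreTokens : List Char → List Char → Bool → List String
  | [], _, _ => []
  | c :: rest, tmp, q =>
    if c = '"' then nwkPreTokens rest (tmp ++ [c]) (!q)
    else if q then nwkPreTokens rest (tmp ++ [c]) q
    else if c = '(' ∨ c = ')' then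
      (if tmp = [] then [] else [String.ofList tmp]) ++ String.ofList [c] :: nwkPreTokens rest [] q
    else if c = ',' then String.ofList tmp :: nwkPreTokens rest [] q
    else if c = ';' then (if tmp = [] then [] else [String.ofList tmp]) ++ nwkPreTokens rest tmp q
    else nwkPreTokens rest (tmp ++ [c]) q

def nwkNameOk : String → List String → Bool
  | _, [] => true
  | p, t :: r =>
    ((if t ≠ "(" ∧ t ≠ ")" ∧ p ≠ ")" then decide (PySem.Str.count t ":" = 1) else true)
      && nwkNameOk t r)

def nwkNamesOkAll : List String → Bool
  | [] => true
  | t :: r => nwkNameOk t r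

def Pre_nwk_split (line : String) : Prop :=
  nwkPreTokens line.toList [] false ≠ [] ∧
    nwkNamesOkAll (nwkPreTokens line.toList [] false) = true
instance (line : String) : Decidable (Pre_nwk_split line) := by
  unfold Pre_nwk_split; infer_instance

def pvWitness_nwk_split : String := "((a:1,b:2):5,c:3);"

def Spec_nwk_split (line : String) (out : List String × List String) : Prop := out = nwk_split_alt line
instance (line : String) (out : List String × List String) : Decidable (Spec_nwk_split line out) := by unfold Spec_nwk_split; infer_instance

-- ===== CLAIM (what is proved, stated in full; the proofs are below) =====
def Claim_equal_nwk_split : Prop := ∀ (line : String), Dom_nwk_split line → Pre_nwk_split line → Spec_nwk_split line (nwk_split line)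

-- ===== LEMMAS AND PROOFS =====

theorem nwkEmit_fst (L : List String) (p : List String × List String) :
    (L.foldl nwkEmit p).1 = p.1 ++ L := by
  induction L generalizing p with
  | nil => simp
  | cons t r ih => simp [nwkEmit, ih]

def nwkNames (L : List String) : List String := (L.foldl nwkEmit ([], [])).2

theorem nwkFoldl_emit (L : List String) : L.foldl nwkEmit ([], []) = (L, nwkNames L) := by
  exact Prod.ext (by simpa using nwkEmit_fst L ([], [])) rfl

theorem nwkNames_snoc (L : List String) (t : String) :
    nwkNames (L ++ [t]) = (nwkEmit (L, nwkNames L) t).2 := by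
  rw [nwkNames, List.foldl_append, nwkFoldl_emit]
  rfl

theorem nwkEmit_paren (p : List String × List String) (t : String) (h : t = "(" ∨ t = ")") :
    (nwkEmit p t).2 = p.2 := by
  rcases h with h | h <;> subst h <;> simp [nwkEmit]

theorem nwkNames_ext (L : List String) (h : PySem.List.pyGet? L (-1) = some ")") :
    nwkNames (L ++ ["_:0"]) = nwkNames L := by
  rw [PySem.List.pyGet?_neg_one] at h
  have hne : L ≠ [] := by rintro rfl; simp at h
  have hlast : L.getLast hne = ")" := by
    have := List.getLast?_eq_some_getLast (h := hne)
    rw [this] at h; exact (Option.some_inj.mp h)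
  rw [nwkNames_snoc]
  simp [nwkEmit, PySem.List.pyGetD_neg_one _ _ hne, hlast]

theorem nwkStepB_one (ls : List String) (tmp : List Char) (ins : Int) (c : Char) :
    nwkStepB ((ls, nwkNames ls), tmp, ins) c =
      (((nwkStepA (ls, tmp, ins) c).1, nwkNames (nwkStepA (ls, tmp, ins) c).1),
        (nwkStepA (ls, tmp, ins) c).2) := by
  unfold nwkStepA nwkStepB
  by_cases h1 : c = '"'
  · simp [h1]
  by_cases h2 : ins = 0
  case neg => simp [h1, h2]
  by_cases h3 : c = '(' ∨ c = ')'
  · have hpar : String.ofList [c] = "(" ∨ String.ofList [c] = ")" := by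
      rcases h3 with h | h <;> subst h
      · left; rfl
      · right; rfl
    by_cases h4 : tmp = []
    · subst h4
      simp [h1, h2, h3, nwkNames_snoc, nwkEmit_paren _ _ hpar]
    · have hlen : tmp.length ≥ 1 := by
        cases tmp with
        | nil => simp at h4
        | cons a b => simp
      have hfst : (nwkEmit (ls, nwkNames ls) (String.ofList tmp)).1 = ls ++ [String.ofList tmp] := rfl
      have hsnd : (nwkEmit (ls, nwkNames ls) (String.ofList tmp)).2
          = nwkNames (ls ++ [String.ofList tmp]) := (nwkNames_snoc _ _).symm
      have hjoin : ls ++ [String.ofList tmp, String.ofList [c]]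
          = (ls ++ [String.ofList tmp]) ++ [String.ofList [c]] := by simp
      simp only [h1, h2, h3, h4, hlen, if_pos, if_neg, not_false_iff, ne_eq,
        hfst, hsnd]
      simp
      rw [hjoin, nwkNames_snoc (ls ++ [String.ofList tmp]) (String.ofList [c]),
        nwkEmit_paren _ _ hpar]
  by_cases h5 : c = ','
  · simp [h2, h5, nwkNames_snoc]
    exact Prod.ext rfl rfl
  by_cases h6 : c = ';'
  · by_cases h4 : tmp = []
    · subst h4; simp [h2, h6]
    · have hlen : tmp.length ≥ 1 := by
        cases tmp with
        | nil => simp at h4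
        | cons a b => simp
      simp [h2, h6, h4, hlen, nwkNames_snoc]
      rfl
  · simp [h1, h2, h3, h5, h6]

theorem nwkStepB_eq (cs : List Char) :
    ∀ (ls : List String) (tmp : List Char) (ins : Int),
      cs.foldl nwkStepB ((ls, nwkNames ls), tmp, ins) =
        (((cs.foldl nwkStepA (ls, tmp, ins)).1,
           nwkNames (cs.foldl nwkStepA (ls, tmp, ins)).1),
          (cs.foldl nwkStepA (ls, tmp, ins)).2) := by
  induction cs with
  | nil => intro ls tmp ins; rfl
  | cons c r ih =>
    intro ls tmp ins
    simp only [List.foldl_cons, nwkStepB_one]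
    exact ih _ _ _

theorem nwkNameLoop_eq (L : List String) :
    (PySem.List.pyRange 1 (L.length : Int) 1).foldl (nwkNameStep L) [] = nwkNames L := by
  induction L using List.reverseRecOn with
  | nil => rw [PySem.List.pyRange_one_eq_nil (by norm_num)]; rfl
  | append_singleton L t ih =>
    by_cases hL : L = []
    · subst hL
      have h1 : ((([] : List String) ++ [t]).length : Int) = 1 := by simp
      rw [h1, PySem.List.pyRange_one_eq_nil (by norm_num)]
      simp [nwkNames, nwkEmit]
    · have hpos : 0 < L.length := List.length_pos_iff.mpr hL
      have hlen : ((L ++ [t]).length : Int) = (L.length : Int) + 1 := by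
        simp
      have hr : PySem.List.pyRange 1 ((L ++ [t]).length : Int) 1
          = PySem.List.pyRange 1 (L.length : Int) 1 ++ [(L.length : Int)] := by
        rw [hlen, PySem.List.pyRange_one_succ_right (by exact_mod_cast hpos)]
      rw [hr, List.foldl_append]
      have hcong : (PySem.List.pyRange 1 (L.length : Int) 1).foldl (nwkNameStep (L ++ [t])) []
          = (PySem.List.pyRange 1 (L.length : Int) 1).foldl (nwkNameStep L) [] := by
        apply PySem.List.foldl_congr_mem
        intro acc i hi
        rw [PySem.List.mem_pyRange_one] at hi
        have h0 : (0:Int) ≤ i - 1 := by omega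
        have h1 : (0:Int) ≤ i := by omega
        have hi1 : (i - 1).toNat < L.length := by omega
        have hi2 : i.toNat < L.length := by omega
        unfold nwkNameStep
        rw [PySem.List.pyGetD_of_nonneg _ _ h0, PySem.List.pyGetD_of_nonneg _ _ h1,
          PySem.List.pyGetD_of_nonneg _ _ h0, PySem.List.pyGetD_of_nonneg _ _ h1,
          List.getD_append _ _ _ _ hi1, List.getD_append _ _ _ _ hi2]
      rw [hcong, ih]
      simp only [List.foldl_cons, List.foldl_nil]
      -- the final index: current = t, prev = L.getLast
      have hprev : PySem.List.pyGetD (L ++ [t]) ((L.length : Int) - 1) ""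
          = L.getLast hL := by
        have h0 : (0:Int) ≤ (L.length : Int) - 1 := by omega
        rw [PySem.List.pyGetD_of_nonneg _ _ h0,
          List.getD_append _ _ _ _ (by omega),
          List.getD_eq_getElem _ _ (by omega), List.getLast_eq_getElem]
        congr 1
        omega
      have hcur : PySem.List.pyGetD (L ++ [t]) ((L.length : Int)) "" = t := by
        rw [PySem.List.pyGetD_natCast]
        simp
      rw [nwkNames_snoc]
      simp only [nwkNameStep, nwkEmit, hprev, hcur]
      simp only [ne_eq]
      by_cases c1 : t = "("
      · simp [c1]
      by_cases c2 : t = ")"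
      · simp [c2]
      by_cases c3 : L.getLast hL = ")"
      · simp [c1, c2, c3, PySem.List.pyGetD_neg_one _ _ hL]
      · simp [c1, c2, c3, hL, PySem.List.pyGetD_neg_one _ _ hL]

theorem nwk_split_eq (line : String) : nwk_split line = nwk_split_alt line := by
  have hB : line.toList.foldl nwkStepB (([], []), [], 0)
      = (((line.toList.foldl nwkStepA ([], [], 0)).1,
           nwkNames (line.toList.foldl nwkStepA ([], [], 0)).1),
          (line.toList.foldl nwkStepA ([], [], 0)).2) :=
    nwkStepB_eq line.toList [] [] 0
  simp only [nwk_split, nwk_split_alt, hB]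
  cases hget : PySem.List.pyGet? (line.toList.foldl nwkStepA ([], [], 0)).1 (-1) with
  | none => simp only [nwkNameLoop_eq]
  | some t =>
    by_cases ht : t = ")"
    · simp only [ht, nwkNameLoop_eq, if_true]
      rw [nwkNames_ext _ (ht ▸ hget)]
    · simp only [if_neg ht, nwkNameLoop_eq]

-- ===== VERDICT (by name: the statement is the Claim_ definition above) =====
theorem nwk_split_spec : Claim_equal_nwk_split := by
  intro line _ _
  unfold Spec_nwk_split
  exact nwk_split_eq line
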